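-- pv_equiv track=rewrite | github.com/DuyTungHa/Algorithms-and-Data-Structures | Algorithms on Strings/week2/_529f54ab2b45544c6c1f6b380b6cdeff_Programming-Assignment-2/bwtinverse/bwtinverse.py | rankBWT
-- ===== SOURCE A (Python) =====
-- def rankBWT(bwt):
--     tots = dict()
--     ranks = []
--     for c in bwt:
--         if c not in tots:
--             tots[c] = 0
--         ranks.append(tots[c])
--         tots[c] += 1
--     return ranks, tots
-- ===== SOURCE B (Python) =====
-- def rankBWT(bwt):
--     lst = list(bwt)
--     ranks = [lst[:i].count(c) for i, c in enumerate(lst)]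
--     tots = {c: lst.count(c) for c in dict.fromkeys(lst)}
--     return ranks, tots
-- ===== Notes on version B (the rewrite author's own statement) =====
-- stated objective: simpler
-- what changed: Replaces the stateful running-counter sweep (mutable dict updated per character) with stateless counting: each rank is the count of the character in the preceding prefix, and totals are a dict comprehension over the first-occurrence-ordered distinct characters.
import Mathlib
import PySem

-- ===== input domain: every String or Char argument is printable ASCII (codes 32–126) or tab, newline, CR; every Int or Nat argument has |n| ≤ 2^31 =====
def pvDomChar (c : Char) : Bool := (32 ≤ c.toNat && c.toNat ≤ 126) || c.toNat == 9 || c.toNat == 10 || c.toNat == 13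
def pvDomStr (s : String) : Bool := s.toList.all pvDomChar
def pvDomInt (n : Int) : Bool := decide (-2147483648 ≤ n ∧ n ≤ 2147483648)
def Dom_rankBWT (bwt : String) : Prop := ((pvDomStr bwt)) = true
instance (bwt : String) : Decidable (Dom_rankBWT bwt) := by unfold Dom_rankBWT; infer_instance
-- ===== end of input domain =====

-- B replaces A's stateful running-counter sweep with stateless prefix counting (simpler, though quadratic).


-- the one-character string Python iteration yields for a character (dict keys of both programs)
def pvKey (c : Char) : String := String.ofList [c]

-- ===== PORT A =====
-- loop body: if c not in tots: tots[c] = 0; ranks.append(tots[c]); tots[c] += 1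
def pvStepA (st : PySem.Dict String Int × List Int) (c : Char) : PySem.Dict String Int × List Int :=
  let s := pvKey c
  let tots := if st.1.contains s then st.1 else st.1.insert s 0
  let r := tots.getD s 0
  (tots.insert s (r + 1), st.2 ++ [r])

def rankBWT (bwt : String) : List Int × (List (String × Int)) :=
  let res := bwt.toList.foldl pvStepA (PySem.Dict.empty, [])
  (res.2, res.1.items)

-- ===== PORT B =====
def rankBWT_alt (bwt : String) : List Int × (List (String × Int)) :=
  let lst := bwt.toList
  let ranks := (PySem.List.enumerate lst).map
    (fun p => ((PySem.List.slice lst none (some p.1)).count p.2 : Int))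
  let tots := (PySem.List.dedup lst).map (fun c => (pvKey c, (lst.count c : Int)))
  (ranks, tots)

-- ===== PRECONDITION & SPEC =====
def Spec_rankBWT (bwt : String) (out : List Int × (List (String × Int))) : Prop := out = rankBWT_alt bwt
instance (bwt : String) (out : List Int × (List (String × Int))) : Decidable (Spec_rankBWT bwt out) := by unfold Spec_rankBWT; infer_instance

-- ===== CLAIM (what is proved, stated in full; the proofs are below) =====
def Claim_equal_rankBWT : Prop := ∀ (bwt : String), Dom_rankBWT bwt → Spec_rankBWT bwt (rankBWT bwt)

-- ===== LEMMAS AND PROOFS =====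

theorem pvKey_injective : Function.Injective pvKey := by
  intro a b h
  have h2 := congrArg String.toList h
  simpa [pvKey, String.toList_ofList] using h2

-- A's loop body, simplified: either branch amounts to one overwrite at pvKey c
theorem pvStepA_eq (st : PySem.Dict String Int × List Int) (c : Char) :
    pvStepA st c =
      (st.1.insert (pvKey c) (st.1.getD (pvKey c) 0 + 1), st.2 ++ [st.1.getD (pvKey c) 0]) := by
  simp only [pvStepA]
  by_cases h : st.1.contains (pvKey c)
  · simp [h]
  · rw [if_neg h, PySem.Dict.getD_insert_self, PySem.Dict.insert_insert_self,
      PySem.Dict.getD_of_not_contains _ _ (by simpa using h)]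

-- closed form of A's fold: dict part is the counter loop over the key images,
-- ranks part is B's prefix-count expression
theorem pvFoldA_spec (p : List Char) :
    p.foldl pvStepA (PySem.Dict.empty, []) =
      ((p.map pvKey).foldl (fun d s => d.insert s (d.getD s 0 + 1)) PySem.Dict.empty,
       (PySem.List.enumerate p).map
         (fun q => ((PySem.List.slice p none (some q.1)).count q.2 : Int))) := by
  induction p using List.reverseRecOn with
  | nil => rfl
  | append_singleton p c ih =>
    rw [List.foldl_append, List.foldl_cons, List.foldl_nil, ih, pvStepA_eq]
    simp only [List.map_append, List.map_singleton, List.foldl_append, List.foldl_cons,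
      List.foldl_nil]
    rw [PySem.List.enumerate_append, List.map_append]
    simp only [Prod.mk.injEq]
    refine ⟨trivial, ?_⟩
    congr 1
    · apply List.map_congr_left
      intro q hq
      rcases ((PySem.List.mem_enumerate_iff _ _ _).mp hq) with ⟨k, hk, rfl⟩
      simp only [zero_add]
      rw [PySem.List.slice_to_natCast, PySem.List.slice_to_natCast,
        List.take_append_of_le_length (le_of_lt hk)]
    · simp only [PySem.List.enumerate_nil, PySem.List.enumerate_cons, List.map_cons, List.map_nil,
        zero_add]
      rw [PySem.Dict.getD_foldl_insert_add_one, PySem.Dict.getD_empty,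
        List.count_map_of_injective p pvKey pvKey_injective, PySem.List.slice_to_natCast]
      simp [List.take_left']

-- the distinct key images in order are the key images of the distinct characters
theorem pvOfList_map_key (p : List Char) :
    PySem.Set.ofList (p.map pvKey) = (PySem.List.dedup p).map pvKey := by
  induction p using List.reverseRecOn with
  | nil => rfl
  | append_singleton p c ih =>
    rw [List.map_append, List.map_singleton, PySem.Set.ofList_append_singleton,
      PySem.List.dedup_eq_ofList, PySem.Set.ofList_append_singleton, ih,
      ← PySem.List.dedup_eq_ofList]
    by_cases h : c ∈ PySem.List.dedup p
    · rw [PySem.Set.add_of_mem (by exact List.mem_map_of_mem h),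
        PySem.Set.add_of_mem h]
    · rw [PySem.Set.add_of_not_mem (fun hm => h ?_), PySem.Set.add_of_not_mem h, List.map_append,
        List.map_singleton]
      rcases List.mem_map.mp hm with ⟨d, hd, hdc⟩
      rwa [pvKey_injective hdc] at hd

-- ===== VERDICT (by name: the statement is the Claim_ definition above) =====
theorem rankBWT_spec : Claim_equal_rankBWT := by
  intro bwt _
  unfold Spec_rankBWT rankBWT rankBWT_alt
  rw [pvFoldA_spec]
  simp only [Prod.mk.injEq]
  refine ⟨trivial, ?_⟩
  rw [PySem.Dict.foldl_insert_getD_add_one_eq_counter, PySem.Dict.items_counter,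
    pvOfList_map_key, List.map_map]
  apply List.map_congr_left
  intro c _
  simp only [Function.comp_apply]
  rw [List.count_map_of_injective _ pvKey pvKey_injective]
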